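-- pv_equiv track=rewrite | github.com/aalkaswan/AdventOfCode24 | day13-1/solution.py | solve
-- ===== SOURCE A (Python) =====
-- def find_split(rows):
--     # return index of split
--     for i in range(0, len(rows)):
--         max_len = min(len(rows) - (i + 1), i+1)
--         up = rows[:i+1][-max_len:]
--         down = rows[i+1:][:max_len]
--         # limit up and down to max_len
--         down.reverse()
--         if up == down:
--             return i + 1
--     return 0
--
-- def solve(input):
--     res = 0
--     for grid in input:
--         horizontal_split = find_split(grid)*100
--         if horizontal_split == 0:
--             # find vertical split
--             vertical_split = find_split(list(zip(*grid)))
--             res += vertical_split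
--         else:
--             res += horizontal_split
--     return res
-- ===== SOURCE B (Python) =====
-- def find_split(rows):
--     # A mirror line exists exactly where the grid has an even-length palindromic
--     # prefix (split at its midpoint m) or an even-length palindromic suffix
--     # (split at n-m): collect all candidate splits and take the smallest.
--     n = len(rows)
--     rev = rows[::-1]
--     cands = [m for m in range(1, n // 2 + 1) if rows[:2 * m] == rev[n - 2 * m:]]
--     cands += [n - m for m in range(1, n // 2 + 1) if rev[:2 * m] == rows[n - 2 * m:]]
--     return min(cands, default=0)
--
-- def _score(grid):
--     h = find_split(grid)
--     return 100 * h if h else find_split(list(zip(*grid)))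
--
-- def solve(input):
--     return sum(_score(g) for g in input)
-- ===== Notes on version B (the rewrite author's own statement) =====
-- stated objective: alternative
-- what changed: find_split is re-characterised: a mirror line is exactly the midpoint of an even-length palindromic prefix or the matching point of an even-length palindromic suffix, so B makes one reversed copy per call, collects ALL candidate split positions from both ends and returns their minimum, instead of A's first-match scan over fold lines with a per-candidate slice/reverse/compare; solve becomes a sum over a per-grid score helper instead of an accumulator loop.
import Mathlib
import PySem

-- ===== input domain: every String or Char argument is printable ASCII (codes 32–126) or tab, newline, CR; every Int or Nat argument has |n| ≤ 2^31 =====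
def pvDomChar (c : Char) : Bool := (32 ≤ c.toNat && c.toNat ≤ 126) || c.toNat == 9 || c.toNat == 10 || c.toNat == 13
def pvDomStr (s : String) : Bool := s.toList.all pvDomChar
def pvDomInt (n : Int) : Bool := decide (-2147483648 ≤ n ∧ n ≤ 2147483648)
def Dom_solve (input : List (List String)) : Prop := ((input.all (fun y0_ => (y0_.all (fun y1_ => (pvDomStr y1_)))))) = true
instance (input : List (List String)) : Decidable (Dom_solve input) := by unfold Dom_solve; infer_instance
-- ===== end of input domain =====

-- B re-characterises the mirror line as the midpoint of an even-length palindromic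
-- prefix or suffix: it collects ALL candidate splits from both ends of one reversed
-- copy and returns their minimum, instead of A's first-match scan over fold lines
-- (objective: alternative algorithmic decomposition, same asymptotic cost).

-- shared helper: exact port of Python's zip(*grid) on a list of rows — truncates to the
-- shortest row; the '.getD j' default is never used since j < every row's length
def zipStar (rows : List (List Char)) : List (List Char) :=
  match rows with
  | [] => []
  | r :: rs =>
      (List.range (rs.foldl (fun m l => min m l.length) r.length)).map
        (fun j => (r :: rs).map (fun row => row.getD j ' '))

-- ===== PORT A =====
-- find_split: for i in range(len(rows)): slice, reverse, compare, first match wins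
def findSplitA {α : Type} [DecidableEq α] (rows : List α) (i : Nat) : Int :=
  if h : i < rows.length then
    let maxLen := min (rows.length - (i + 1)) (i + 1)
    let up := PySem.List.slice (rows.take (i + 1)) (some (-(maxLen : Int))) none
    let down := ((rows.drop (i + 1)).take maxLen).reverse
    if up = down then (i : Int) + 1 else findSplitA rows (i + 1)
  else 0
termination_by rows.length - i
decreasing_by omega

def solve (input : List (List String)) : Int :=
  input.foldl (fun res grid =>
    let horizontal_split := findSplitA grid 0 * 100
    if horizontal_split = 0 then
      res + findSplitA (zipStar (grid.map String.toList)) 0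
    else
      res + horizontal_split) 0

-- ===== PORT B =====
-- candidate splits: m for every even palindromic prefix of length 2m,
-- n-m for every even palindromic suffix of length 2m (the two comprehensions of Source B)
def candsB {α : Type} [DecidableEq α] (rows : List α) : List Int :=
  ((List.range' 1 (rows.length / 2)).filter
      (fun m => decide (rows.take (2 * m) = rows.reverse.drop (rows.length - 2 * m)))).map
      (fun m : Nat => (m : Int))
  ++ ((List.range' 1 (rows.length / 2)).filter
      (fun m => decide (rows.reverse.take (2 * m) = rows.drop (rows.length - 2 * m)))).map
      (fun m : Nat => (rows.length : Int) - (m : Int))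

-- min(cands, default=0)
def pyMinD0 (l : List Int) : Int :=
  match l with
  | [] => 0
  | c :: cs => cs.foldl min c

def findSplitB {α : Type} [DecidableEq α] (rows : List α) : Int :=
  pyMinD0 (candsB rows)

-- _score: 100*h if the horizontal split exists, else the vertical split of the transpose
def scoreB (grid : List String) : Int :=
  let h := findSplitB grid
  if h ≠ 0 then 100 * h else findSplitB (zipStar (grid.map String.toList))

def solve_alt (input : List (List String)) : Int :=
  (input.map scoreB).sum

-- ===== PRECONDITION & SPEC =====
def Spec_solve (input : List (List String)) (out : Int) : Prop := out = solve_alt input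
instance (input : List (List String)) (out : Int) : Decidable (Spec_solve input out) := by unfold Spec_solve; infer_instance

-- ===== CLAIM (what is proved, stated in full; the proofs are below) =====
def Claim_equal_solve : Prop := ∀ (input : List (List String)), Dom_solve input → Spec_solve input (solve input)

-- ===== LEMMAS AND PROOFS =====

-- the pairwise mirror condition at split j (proof-only helper)
def good {α : Type} [DecidableEq α] (rows : List α) (j : Nat) : Bool :=
  (List.range (min (rows.length - j) j)).all
    (fun k => decide (rows[j - 1 - k]? = rows[j + k]?))

lemma good_iff {α : Type} [DecidableEq α] (rows : List α) (j : Nat) :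
    good rows j = true ↔
      ∀ k < min (rows.length - j) j, rows[j - 1 - k]? = rows[j + k]? := by
  simp [good, List.all_eq_true, List.mem_range]

-- A's loop written against 'good' (proof-only helper)
def firstGood {α : Type} [DecidableEq α] (rows : List α) (i : Nat) : Int :=
  if h : i + 1 < rows.length then
    (if good rows (i + 1) then (i : Int) + 1 else firstGood rows (i + 1))
  else 0
termination_by rows.length - i
decreasing_by omega

-- unfolding lemma for findSplitA in plain ite form
lemma findSplitA_eq {α : Type} [DecidableEq α] (rows : List α) (i : Nat) :
    findSplitA rows i =
      if i < rows.length then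
        (if PySem.List.slice (rows.take (i + 1))
              (some (-((min (rows.length - (i + 1)) (i + 1) : Nat) : Int))) none
            = ((rows.drop (i + 1)).take (min (rows.length - (i + 1)) (i + 1))).reverse
          then (i : Int) + 1 else findSplitA rows (i + 1))
      else 0 := by
  rw [findSplitA]
  by_cases h : i < rows.length
  · rw [dif_pos h, if_pos h]
  · rw [dif_neg h, if_neg h]

lemma slice_cond_iff {α : Type} [DecidableEq α] (rows : List α) (i : Nat)
    (h : i + 1 < rows.length) :
    (PySem.List.slice (rows.take (i + 1))
        (some (-((min (rows.length - (i + 1)) (i + 1) : Nat) : Int))) none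
      = ((rows.drop (i + 1)).take (min (rows.length - (i + 1)) (i + 1))).reverse)
    ↔ ∀ k < min (rows.length - (i + 1)) (i + 1), rows[i - k]? = rows[i + 1 + k]? := by
  set n := rows.length with hn
  set m := min (n - (i + 1)) (i + 1) with hm
  have hm1 : 1 ≤ m := by omega
  have hmi : m ≤ i + 1 := by omega
  have hmn : i + 1 + m ≤ n := by omega
  rw [PySem.List.slice_from_neg_natCast _ _ hm1]
  have hlen : (rows.take (i + 1)).length = i + 1 := by
    simp only [List.length_take]; omega
  rw [hlen]
  have hup : ∀ j : Nat, ((rows.take (i + 1)).drop (i + 1 - m))[j]? =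
      if j < m then rows[i + 1 - m + j]? else none := by
    intro j
    rw [List.getElem?_drop, List.getElem?_take]
    split_ifs with h1 h2 h2
    · rfl
    · omega
    · omega
    · rfl
  have hlen2 : ((rows.drop (i + 1)).take m).length = m := by
    simp only [List.length_take, List.length_drop]; omega
  have hdown : ∀ j : Nat, (((rows.drop (i + 1)).take m).reverse)[j]? =
      if j < m then rows[i + m - j]? else none := by
    intro j
    by_cases hj : j < m
    · rw [if_pos hj, List.getElem?_reverse (by omega), hlen2, List.getElem?_take,
        if_pos (by omega), List.getElem?_drop]
      congr 1
      omega
    · rw [if_neg hj]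
      simp only [List.getElem?_eq_none_iff, List.length_reverse, hlen2]
      omega
  constructor
  · intro heq k hk
    have hj := congrArg (fun l => l[m - 1 - k]?) heq
    simp only [hup, hdown, if_pos (by omega : m - 1 - k < m)] at hj
    have e1 : i + 1 - m + (m - 1 - k) = i - k := by omega
    have e2 : i + m - (m - 1 - k) = i + 1 + k := by omega
    rwa [e1, e2] at hj
  · intro H
    apply List.ext_getElem?
    intro j
    rw [hup, hdown]
    by_cases hj : j < m
    · rw [if_pos hj, if_pos hj]
      have hk := H (m - 1 - j) (by omega)
      have e1 : i - (m - 1 - j) = i + 1 - m + j := by omega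
      have e2 : i + 1 + (m - 1 - j) = i + m - j := by omega
      rwa [e1, e2] at hk
    · rw [if_neg hj, if_neg hj]

-- A's per-candidate condition is exactly 'good (i+1)'
lemma slice_cond_iff_good {α : Type} [DecidableEq α] (rows : List α) (i : Nat)
    (h : i + 1 < rows.length) :
    (PySem.List.slice (rows.take (i + 1))
        (some (-((min (rows.length - (i + 1)) (i + 1) : Nat) : Int))) none
      = ((rows.drop (i + 1)).take (min (rows.length - (i + 1)) (i + 1))).reverse)
    ↔ good rows (i + 1) = true := by
  rw [slice_cond_iff rows i h, good_iff]
  constructor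
  · intro H k hk
    have e1 : i + 1 - 1 - k = i - k := by omega
    have e2 : i + 1 + k = i + 1 + k := rfl
    rw [e1]
    exact H k hk
  · intro H k hk
    have e1 : i + 1 - 1 - k = i - k := by omega
    have := H k hk
    rwa [e1] at this
  
lemma findSplitA_eq_firstGood {α : Type} [DecidableEq α] (rows : List α) (i : Nat) :
    findSplitA rows i = firstGood rows i := by
  rw [findSplitA_eq, firstGood]
  by_cases h1 : i + 1 < rows.length
  · rw [if_pos (by omega), dif_pos h1]
    by_cases hc : good rows (i + 1) = true
    · rw [if_pos ((slice_cond_iff_good rows i h1).mpr hc), if_pos hc]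
    · rw [if_neg (fun hh => hc ((slice_cond_iff_good rows i h1).mp hh)), if_neg hc]
      exact findSplitA_eq_firstGood rows (i + 1)
  · by_cases h2 : i < rows.length
    · -- last candidate j = n : A's slice pair is (rows, []) and never matches
      rw [if_pos h2, dif_neg (by omega)]
      have hm0 : min (rows.length - (i + 1)) (i + 1) = 0 := by omega
      rw [hm0]
      have htake : rows.take (i + 1) = rows := List.take_of_length_le (by omega)
      have hup : PySem.List.slice (rows.take (i + 1)) (some (-((0 : Nat) : Int))) none
          = rows := by
        rw [htake]
        simp [pysem]
      rw [hup, List.take_zero, List.reverse_nil,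
        if_neg (by intro hh; rw [hh] at h2; simp at h2)]
      rw [findSplitA_eq, if_neg (by omega)]
    · rw [if_neg h2, dif_neg (by omega)]
termination_by rows.length - i
decreasing_by omega

-- a list of even length is a palindrome iff it mirrors around its centre
lemma pal_iff {α : Type} [DecidableEq α] (t : List α) (m : Nat) (ht : t.length = 2 * m) :
    t = t.reverse ↔ ∀ k < m, t[m - 1 - k]? = t[m + k]? := by
  constructor
  · intro H k hk
    have h2 : m + k < t.length := by omega
    have := congrArg (fun l => l[m + k]?) H
    simp only at this
    rw [List.getElem?_reverse h2] at this
    have e : t.length - 1 - (m + k) = m - 1 - k := by omega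
    rw [e] at this
    exact this.symm
  · intro H
    apply List.ext_getElem?
    intro j
    by_cases hj : j < t.length
    · rw [List.getElem?_reverse hj]
      by_cases hjm : j < m
      · have := H (m - 1 - j) (by omega)
        have e1 : m - 1 - (m - 1 - j) = j := by omega
        have e2 : m + (m - 1 - j) = t.length - 1 - j := by omega
        rwa [e1, e2] at this
      · have := H (j - m) (by omega)
        have e1 : m - 1 - (j - m) = t.length - 1 - j := by omega
        have e2 : m + (j - m) = j := by omega
        rw [e1, e2] at this
        exact this.symm
    · rw [List.getElem?_eq_none_iff.mpr (by omega),
        List.getElem?_eq_none_iff.mpr (by simp; omega)]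

-- B's prefix condition at m is exactly 'good m'
lemma cond1_iff {α : Type} [DecidableEq α] (rows : List α) (m : Nat)
    (h1 : 1 ≤ m) (h2 : 2 * m ≤ rows.length) :
    (rows.take (2 * m) = rows.reverse.drop (rows.length - 2 * m))
      ↔ good rows m = true := by
  rw [List.drop_reverse]
  have e : rows.length - (rows.length - 2 * m) = 2 * m := by omega
  rw [e, good_iff]
  have hmin : min (rows.length - m) m = m := by omega
  rw [hmin]
  have hlen : (rows.take (2 * m)).length = 2 * m := by
    simp only [List.length_take]; omega
  rw [pal_iff (rows.take (2 * m)) m hlen]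
  have hget : ∀ x : Nat, x < 2 * m → (rows.take (2 * m))[x]? = rows[x]? := by
    intro x hx
    rw [List.getElem?_take, if_pos hx]
  constructor
  · intro H k hk
    have := H k hk
    rwa [hget _ (by omega), hget _ (by omega)] at this
  · intro H k hk
    rw [hget _ (by omega), hget _ (by omega)]
    exact H k hk

-- B's suffix condition at m is exactly 'good (n - m)'
lemma cond2_iff {α : Type} [DecidableEq α] (rows : List α) (m : Nat)
    (h1 : 1 ≤ m) (h2 : 2 * m ≤ rows.length) :
    (rows.reverse.take (2 * m) = rows.drop (rows.length - 2 * m))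
      ↔ good rows (rows.length - m) = true := by
  rw [List.take_reverse]
  set s := rows.drop (rows.length - 2 * m) with hs
  have hlen : s.length = 2 * m := by
    simp only [hs, List.length_drop]; omega
  have hiff : (s.reverse = s) ↔ (s = s.reverse) := eq_comm
  rw [hiff, pal_iff s m hlen, good_iff]
  have hmin : min (rows.length - (rows.length - m)) (rows.length - m) = m := by omega
  rw [hmin]
  have hget : ∀ x : Nat, s[x]? = rows[rows.length - 2 * m + x]? := by
    intro x
    rw [hs, List.getElem?_drop]
  constructor
  · intro H k hk
    have := H k hk
    rw [hget, hget] at this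
    have e1 : rows.length - 2 * m + (m - 1 - k) = rows.length - m - 1 - k := by omega
    have e2 : rows.length - 2 * m + (m + k) = rows.length - m + k := by omega
    rwa [e1, e2] at this
  · intro H k hk
    rw [hget, hget]
    have := H k hk
    have e1 : rows.length - 2 * m + (m - 1 - k) = rows.length - m - 1 - k := by omega
    have e2 : rows.length - 2 * m + (m + k) = rows.length - m + k := by omega
    rwa [e1, e2]

-- membership in B's candidate list = the mirror predicate
lemma mem_range'_one (s n m : Nat) : m ∈ List.range' s n ↔ s ≤ m ∧ m < s + n := by
  rw [List.mem_range']
  constructor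
  · rintro ⟨i, hi, rfl⟩; omega
  · intro ⟨h1, h2⟩; exact ⟨m - s, by omega, by omega⟩

lemma mem_candsB {α : Type} [DecidableEq α] (rows : List α) (c : Int) :
    c ∈ candsB rows ↔
      ∃ j : Nat, c = (j : Int) ∧ 1 ≤ j ∧ j + 1 ≤ rows.length ∧ good rows j = true := by
  rw [candsB, List.mem_append]
  constructor
  · rintro (h | h)
    · obtain ⟨m, hm, rfl⟩ := List.mem_map.mp h
      obtain ⟨hmr, hcond⟩ := List.mem_filter.mp hm
      obtain ⟨hm1, hm2⟩ := (mem_range'_one _ _ _).mp hmr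
      have h2 : 2 * m ≤ rows.length := by omega
      exact ⟨m, rfl, hm1, by omega, (cond1_iff rows m hm1 h2).mp (of_decide_eq_true hcond)⟩
    · obtain ⟨m, hm, rfl⟩ := List.mem_map.mp h
      obtain ⟨hmr, hcond⟩ := List.mem_filter.mp hm
      obtain ⟨hm1, hm2⟩ := (mem_range'_one _ _ _).mp hmr
      have h2 : 2 * m ≤ rows.length := by omega
      exact ⟨rows.length - m, by omega, by omega, by omega,
        (cond2_iff rows m hm1 h2).mp (of_decide_eq_true hcond)⟩
  · rintro ⟨j, rfl, hj1, hj2, hg⟩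
    by_cases hc : 2 * j ≤ rows.length
    · left
      refine List.mem_map.mpr ⟨j, List.mem_filter.mpr ⟨?_, ?_⟩, rfl⟩
      · exact (mem_range'_one _ _ _).mpr ⟨hj1, by omega⟩
      · exact decide_eq_true ((cond1_iff rows j hj1 hc).mpr hg)
    · right
      have h2 : 2 * (rows.length - j) ≤ rows.length := by omega
      refine List.mem_map.mpr ⟨rows.length - j, List.mem_filter.mpr ⟨?_, ?_⟩,
        by omega⟩
      · exact (mem_range'_one _ _ _).mpr ⟨by omega, by omega⟩
      · apply decide_eq_true
        have e : rows.length - (rows.length - j) = j := by omega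
        rw [cond2_iff rows (rows.length - j) (by omega) h2, e]
        exact hg

lemma foldl_min_mem (cs : List Int) : ∀ c : Int, cs.foldl min c ∈ c :: cs := by
  induction cs with
  | nil => intro c; simp
  | cons a cs ih =>
      intro c
      rw [List.foldl_cons]
      rcases List.mem_cons.mp (ih (min c a)) with h | h
      · rcases min_choice c a with hm | hm
        · rw [h, hm]; simp
        · rw [h, hm]; simp
      · simp [List.mem_cons.mpr (Or.inr h)]

lemma foldl_min_le (cs : List Int) : ∀ c x : Int, x ∈ c :: cs → cs.foldl min c ≤ x := by
  induction cs with
  | nil =>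
      intro c x hx
      rw [List.foldl_nil]
      rcases List.mem_cons.mp hx with rfl | h
      · exact le_refl _
      · simp at h
  | cons a cs ih =>
      intro c x hx
      rw [List.foldl_cons]
      have hself : cs.foldl min (min c a) ≤ min c a :=
        ih (min c a) (min c a) (List.mem_cons.mpr (Or.inl rfl))
      rcases List.mem_cons.mp hx with rfl | hx2
      · exact le_trans hself (min_le_left _ _)
      · rcases List.mem_cons.mp hx2 with rfl | hx3
        · exact le_trans hself (min_le_right _ _)
        · exact ih (min c a) x (List.mem_cons.mpr (Or.inr hx3))

lemma firstGood_none {α : Type} [DecidableEq α] (rows : List α) :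
    ∀ i, (∀ j, i < j → j + 1 ≤ rows.length → good rows j = false) →
      firstGood rows i = 0 := by
  intro i
  induction' hd : rows.length - i using Nat.strong_induction_on with d ih generalizing i
  intro H
  rw [firstGood]
  by_cases h1 : i + 1 < rows.length
  · rw [dif_pos h1]
    rw [if_neg (by rw [H (i + 1) (by omega) (by omega)]; simp)]
    exact ih (rows.length - (i + 1)) (by omega) (i + 1) rfl
      (fun j hj hjn => H j (by omega) hjn)
  · rw [dif_neg h1]

lemma firstGood_least {α : Type} [DecidableEq α] (rows : List α) (j0 : Nat)
    (hg : good rows j0 = true) (hn : j0 + 1 ≤ rows.length)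
    (hmin : ∀ j, 1 ≤ j → j < j0 → good rows j = false) :
    ∀ i, i < j0 → firstGood rows i = (j0 : Int) := by
  intro i
  induction' hd : j0 - i using Nat.strong_induction_on with d ih generalizing i
  intro hi
  rw [firstGood]
  rw [dif_pos (by omega)]
  by_cases he : i + 1 = j0
  · rw [he, if_pos hg]
    omega
  · rw [if_neg (by rw [hmin (i + 1) (by omega) (by omega)]; simp)]
    exact ih (j0 - (i + 1)) (by omega) (i + 1) rfl (by omega)

-- the central lemma: A's first-match scan equals B's minimum-of-candidates
lemma findSplit_eq {α : Type} [DecidableEq α] (rows : List α) :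
    findSplitA rows 0 = findSplitB rows := by
  rw [findSplitA_eq_firstGood]
  by_cases hex : ∃ j : Nat, 1 ≤ j ∧ j + 1 ≤ rows.length ∧ good rows j = true
  · have hP := Nat.find_spec hex
    set j0 := Nat.find hex with hj0def
    obtain ⟨hj01, hj0n, hj0g⟩ := hP
    have hminb : ∀ j, 1 ≤ j → j < j0 → good rows j = false := by
      intro j h1 hlt
      have := Nat.find_min hex hlt
      cases hgb : good rows j
      · rfl
      · exact absurd ⟨h1, by omega, hgb⟩ this
    have hA : firstGood rows 0 = (j0 : Int) :=
      firstGood_least rows j0 hj0g hj0n hminb 0 (by omega)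
    have hmem : (j0 : Int) ∈ candsB rows :=
      (mem_candsB rows _).mpr ⟨j0, rfl, hj01, hj0n, hj0g⟩
    rw [hA, findSplitB]
    cases hc : candsB rows with
    | nil => rw [hc] at hmem; exact absurd hmem (List.not_mem_nil)
    | cons c cs =>
        have hr_mem : cs.foldl min c ∈ candsB rows := by
          rw [hc]; exact foldl_min_mem cs c
        obtain ⟨jr, hreq, hr1, hr2, hrg⟩ := (mem_candsB rows _).mp hr_mem
        have hge : j0 ≤ jr := Nat.find_min' hex ⟨hr1, hr2, hrg⟩
        have hle : cs.foldl min c ≤ (j0 : Int) := by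
          apply foldl_min_le
          rw [← hc]
          exact hmem
        have hge' : (j0 : Int) ≤ cs.foldl min c := by
          rw [hreq]; exact_mod_cast hge
        show (j0 : Int) = pyMinD0 (c :: cs)
        show (j0 : Int) = cs.foldl min c
        omega
  · push Not at hex
    have hA : firstGood rows 0 = 0 := by
      apply firstGood_none
      intro j hj hjn
      cases hgb : good rows j
      · rfl
      · exact absurd hgb (hex j (by omega) hjn)
    have hB : candsB rows = [] := by
      apply List.eq_nil_iff_forall_not_mem.mpr
      intro c hc
      obtain ⟨j, _, hj1, hj2, hg⟩ := (mem_candsB rows c).mp hc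
      exact absurd hg (hex j hj1 hj2)
    rw [hA, findSplitB, hB]
    rfl

-- A's fold body adds exactly B's per-grid score
lemma stepA_eq (res : Int) (g : List String) :
    (let horizontal_split := findSplitA g 0 * 100;
      if horizontal_split = 0 then
        res + findSplitA (zipStar (g.map String.toList)) 0
      else
        res + horizontal_split)
    = res + scoreB g := by
  simp only [findSplit_eq, scoreB]
  by_cases h0 : findSplitB g = 0
  · simp [h0]
  · have hne : findSplitB g * 100 ≠ 0 := by
      intro hc
      rcases mul_eq_zero.mp hc with h | h
      · exact h0 h
      · norm_num at h
    simp only [if_neg hne, if_pos h0]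
    rw [mul_comm]

lemma foldl_to_sum (l : List (List String)) : ∀ a : Int,
    l.foldl (fun res grid =>
        let horizontal_split := findSplitA grid 0 * 100;
        if horizontal_split = 0 then
          res + findSplitA (zipStar (grid.map String.toList)) 0
        else
          res + horizontal_split) a
    = a + (l.map scoreB).sum := by
  induction l with
  | nil => intro a; simp
  | cons g gs ih =>
      intro a
      rw [List.foldl_cons, stepA_eq]
      rw [ih (a + scoreB g)]
      simp [List.map_cons, List.sum_cons]
      ring

-- ===== VERDICT (by name: the statement is the Claim_ definition above) =====
theorem solve_spec : Claim_equal_solve := by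
  intro input _
  unfold Spec_solve solve solve_alt
  rw [foldl_to_sum]
  simp
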